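-- pv_equiv track=rewrite | github.com/ArushC/ciphers | transposition/railfence.py | build_ciphertext_chunks
-- ===== SOURCE A (Python) =====
-- def determineValues(key, offset): #determine starting row value and whether increasing/decreasing based on offset
--     modular_equivalent = 2 * key - 2
--     offset %= modular_equivalent
--     if offset > key - 1:
--         step = -1
--         row = modular_equivalent - offset
--     else:
--         step = 1
--         row = offset
--     return row, step
--
-- def build_ciphertext_chunks(key, message, offset=0):
--     #Step 1 in decryption: build array rowLengths to determine how many letters are in each row of the 'fence'
--     rowLengths = [0] * key
--     index = 0
--     row, step = determineValues(key, offset)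
--     while row < key and index < len(message):
--         rowLengths[row] += 1
--         if (index > 0 and row == 0) or row == (key - 1):
--             step *= -1
--         row += step
--         index += 1
--     #step 2 in decryption: build ciphertext_chunks by placing the letters from each row of the 'fence' into its own list
--     ciphertext_chunks = []
--     for c in range(key):
--         ciphertext_chunks.append([])
--     index = 0 #same variable name used for another index
--     for i in range(len(ciphertext_chunks)):
--         for c in range(rowLengths[i]):
--             ciphertext_chunks[i].append(message[c + index])
--         index += rowLengths[i]
--     return ciphertext_chunks #this array will be used in the final step of decryption
-- ===== SOURCE B (Python) =====
-- def build_ciphertext_chunks(key, message, offset=0):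
--     # Closed-form zigzag row: position i sits on rail min(r, period - r) where
--     # r = (offset + i) % period, period = 2*key - 2; then slice message into chunks.
--     period = 2 * key - 2
--     rowLengths = [0] * key
--     for i in range(len(message)):
--         r = (offset + i) % period
--         rowLengths[min(r, period - r)] += 1
--     chunks = []
--     pos = 0
--     for n in rowLengths:
--         chunks.append(list(message[pos:pos + n]))
--         pos += n
--     return chunks
-- ===== Notes on version B (the rewrite author's own statement) =====
-- stated objective: simpler
-- what changed: Replaces A's row/step zigzag state machine (with its index>0 first-step toggle rule) by the closed-form rail index min(r, period - r) for r = (offset+i) % period, and builds each chunk by slicing the message instead of appending characters one by one.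
import Mathlib
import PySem

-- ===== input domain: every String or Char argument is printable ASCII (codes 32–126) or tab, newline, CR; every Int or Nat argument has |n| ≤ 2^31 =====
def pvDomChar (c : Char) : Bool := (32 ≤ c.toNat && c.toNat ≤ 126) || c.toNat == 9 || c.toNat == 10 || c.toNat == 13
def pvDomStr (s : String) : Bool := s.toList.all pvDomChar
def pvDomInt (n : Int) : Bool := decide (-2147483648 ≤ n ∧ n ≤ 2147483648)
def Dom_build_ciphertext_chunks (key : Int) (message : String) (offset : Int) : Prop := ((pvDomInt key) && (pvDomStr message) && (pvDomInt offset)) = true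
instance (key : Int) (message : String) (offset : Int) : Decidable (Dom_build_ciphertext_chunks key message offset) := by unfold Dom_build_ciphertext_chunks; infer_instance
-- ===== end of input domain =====

-- B replaces A's row/step zigzag state machine by the closed-form rail index
-- min(r, period - r), r = (offset+i) % period, and slices the message into chunks (objective: simpler).

-- ===== PORT A =====
def pvDetermineValues (key offset : Int) : Int × Int :=
  let m := 2 * key - 2
  let off := PySem.Int.mod offset m
  if off > key - 1 then (m - off, -1) else (off, 1)

-- A's while loop; fuel cs.length dominates the loop count since the guard has index < cs.length
-- and index increases by 1 each pass.  Under Pre_, row stays in [0, key-1], so Python's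
-- negative-index wraparound for rowLengths[row] is unreachable and List.set at row.toNat is exact.
def pvALoop1 (key : Int) (cs : List Char) : Nat → List Int → Int → Int → Nat → List Int
  | 0, rl, _, _, _ => rl
  | n + 1, rl, row, step, index =>
    if row < key ∧ index < cs.length then
      let rl' := rl.set row.toNat (rl.getD row.toNat 0 + 1)
      let step' := if (0 < index ∧ row = 0) ∨ row = key - 1 then -step else step
      pvALoop1 key cs n rl' (row + step') step' (index + 1)
    else rl

-- A's step 2: for each row, append message[c + index] for c in range(rowLengths[i]).
-- Under Pre_ every index c + index is in range, so the .getD ' ' default is unreachable.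
def pvALoop2 (cs : List Char) : List Int → Int → List (List String)
  | [], _ => []
  | n :: rest, index =>
      ((PySem.List.pyRange 0 n 1).map
        (fun c => String.ofList [(PySem.List.pyGet? cs (c + index)).getD ' '])) ::
      pvALoop2 cs rest (index + n)

def build_ciphertext_chunks (key : Int) (message : String) (offset : Int) : List (List String) :=
  let cs := message.toList
  let rs := pvDetermineValues key offset
  let rowLengths := pvALoop1 key cs cs.length (List.replicate key.toNat 0) rs.1 rs.2 0
  pvALoop2 cs rowLengths 0

-- ===== PORT B =====
def pvBChunks (cs : List Char) : List Int → Int → List (List String)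
  | [], _ => []
  | n :: rest, pos =>
      ((PySem.List.slice cs (some pos) (some (pos + n))).map (fun ch => String.ofList [ch])) ::
      pvBChunks cs rest (pos + n)

def build_ciphertext_chunks_alt (key : Int) (message : String) (offset : Int) : List (List String) :=
  let cs := message.toList
  let period := 2 * key - 2
  let rowLengths := (List.range cs.length).foldl
    (fun rl (i : Nat) =>
      let r := PySem.Int.mod (offset + (i : Int)) period
      let row := min r (period - r)
      rl.set row.toNat (rl.getD row.toNat 0 + 1))
    (List.replicate key.toNat 0)
  pvBChunks cs rowLengths 0

-- ===== PRECONDITION & SPEC =====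
-- Pre_ excludes exactly the inputs where A raises: key == 1 (ZeroDivisionError on offset %= 0)
-- and key <= 0 with a nonempty message (IndexError indexing the empty/short rowLengths).
def Pre_build_ciphertext_chunks (key : Int) (message : String) (offset : Int) : Prop :=
  2 ≤ key ∨ (key ≤ 0 ∧ message = "")
instance (key : Int) (message : String) (offset : Int) : Decidable (Pre_build_ciphertext_chunks key message offset) := by unfold Pre_build_ciphertext_chunks; infer_instance

def pvWitness_build_ciphertext_chunks : Int × String × Int := (3, "HELLO", 1)

def Spec_build_ciphertext_chunks (key : Int) (message : String) (offset : Int) (out : List (List String)) : Prop := out = build_ciphertext_chunks_alt key message offset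
instance (key : Int) (message : String) (offset : Int) (out : List (List String)) : Decidable (Spec_build_ciphertext_chunks key message offset out) := by unfold Spec_build_ciphertext_chunks; infer_instance

-- ===== CLAIM (what is proved, stated in full; the proofs are below) =====
def Claim_equal_build_ciphertext_chunks : Prop := ∀ (key : Int) (message : String) (offset : Int), Dom_build_ciphertext_chunks key message offset → Pre_build_ciphertext_chunks key message offset → Spec_build_ciphertext_chunks key message offset (build_ciphertext_chunks key message offset)

-- ===== LEMMAS AND PROOFS =====

-- the row B assigns to position i
def pvRowOf (key offset : Int) (i : Nat) : Int :=
  min (PySem.Int.mod (offset + (i : Int)) (2 * key - 2))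
      (2 * key - 2 - PySem.Int.mod (offset + (i : Int)) (2 * key - 2))

-- the step A's state machine carries at loop top for position i
def pvStepVal (key offset : Int) (i : Nat) : Int :=
  if PySem.Int.mod (offset + (i : Int)) (2 * key - 2) = 0 ∧ i ≠ 0 then -1
  else if PySem.Int.mod (offset + (i : Int)) (2 * key - 2) ≤ key - 1 then 1 else -1

def pvIncr (rl : List Int) (r : Int) : List Int := rl.set r.toNat (rl.getD r.toNat 0 + 1)

theorem pv_mod_add_one (a P : Int) (hP : 1 < P) :
    PySem.Int.mod (a + 1) P =
      (if PySem.Int.mod a P = P - 1 then 0 else PySem.Int.mod a P + 1) := by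
  simp only [PySem.Int.mod_eq_emod_of_pos (show (0:Int) < P by omega)]
  have h0 : 0 ≤ a % P := Int.emod_nonneg a (by omega)
  have h1 : a % P < P := Int.emod_lt_of_pos a (by omega)
  have h2 : (a + 1) % P = (a % P + 1) % P := by
    rw [Int.add_emod, Int.emod_eq_of_lt (show (0:Int) ≤ 1 by omega) (by omega)]
  split_ifs with h
  · rw [h2, h]; simp
  · rw [h2, Int.emod_eq_of_lt (by omega) (by omega)]

theorem pv_rowOf_bounds (key offset : Int) (hk : 2 ≤ key) (i : Nat) :
    0 ≤ pvRowOf key offset i ∧ pvRowOf key offset i ≤ key - 1 := by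
  unfold pvRowOf
  have h0 : 0 ≤ PySem.Int.mod (offset + (i : Int)) (2 * key - 2) :=
    PySem.Int.mod_nonneg (offset + (i : Int)) (by omega)
  have h1 : PySem.Int.mod (offset + (i : Int)) (2 * key - 2) < 2 * key - 2 :=
    PySem.Int.mod_lt (offset + (i : Int)) (by omega)
  omega

theorem pv_loop1_eq (key offset : Int) (hk : 2 ≤ key) (cs : List Char) :
    ∀ (n index : Nat) (rl : List Int),
      index + n = cs.length →
      pvALoop1 key cs n rl (pvRowOf key offset index) (pvStepVal key offset index) index =
        (List.range' index n).foldl (fun rl i => pvIncr rl (pvRowOf key offset i)) rl := by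
  intro n
  induction n with
  | zero => intro index rl _; simp [pvALoop1]
  | succ n ih =>
    intro index rl hlen
    have hidx : index < cs.length := by omega
    have hrb := pv_rowOf_bounds key offset hk index
    have hp0 := PySem.Int.mod_nonneg (offset + (index : Int)) (show (0:Int) < 2 * key - 2 by omega)
    have hp1 := PySem.Int.mod_lt (offset + (index : Int)) (show (0:Int) < 2 * key - 2 by omega)
    have hsucc : PySem.Int.mod (offset + ((index + 1 : Nat) : Int)) (2 * key - 2) =
        if PySem.Int.mod (offset + (index : Int)) (2 * key - 2) = 2 * key - 2 - 1 then 0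
        else PySem.Int.mod (offset + (index : Int)) (2 * key - 2) + 1 := by
      push_cast
      rw [← add_assoc]
      exact pv_mod_add_one _ _ (by omega)
    have hrow' : pvRowOf key offset index +
        (if (0 < index ∧ pvRowOf key offset index = 0) ∨ pvRowOf key offset index = key - 1
         then -(pvStepVal key offset index) else pvStepVal key offset index) =
        pvRowOf key offset (index + 1) := by
      unfold pvRowOf pvStepVal
      simp only [hsucc]
      split_ifs <;> omega
    have hstep' : (if (0 < index ∧ pvRowOf key offset index = 0) ∨ pvRowOf key offset index = key - 1
         then -(pvStepVal key offset index) else pvStepVal key offset index) =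
        pvStepVal key offset (index + 1) := by
      unfold pvRowOf pvStepVal
      simp only [hsucc]
      split_ifs <;> omega
    simp only [pvALoop1]
    rw [if_pos ⟨by omega, hidx⟩]
    rw [List.range'_succ, List.foldl_cons, hrow', hstep']
    exact ih (index + 1) (pvIncr rl (pvRowOf key offset index)) (by omega)

theorem pv_det_eq (key offset : Int) (hk : 2 ≤ key) :
    pvDetermineValues key offset = (pvRowOf key offset 0, pvStepVal key offset 0) := by
  unfold pvDetermineValues pvRowOf pvStepVal
  have h0 : 0 ≤ PySem.Int.mod offset (2 * key - 2) :=
    PySem.Int.mod_nonneg offset (by omega)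
  have h1 : PySem.Int.mod offset (2 * key - 2) < 2 * key - 2 :=
    PySem.Int.mod_lt offset (by omega)
  simp only [Nat.cast_zero, add_zero]
  split_ifs <;> simp only [Prod.mk.injEq] <;> constructor <;> first | omega | trivial

theorem pv_sum_incr (rl : List Int) (j : Nat) (h : j < rl.length) :
    (rl.set j (rl.getD j 0 + 1)).sum = rl.sum + 1 := by
  induction rl generalizing j with
  | nil => simp at h
  | cons x xs ih =>
    cases j with
    | zero => simp [List.getD]; ring
    | succ k =>
      simp only [List.getD_cons_succ, List.set_cons_succ, List.sum_cons]
      rw [ih k (by simpa using h)]; ring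

theorem pv_fold_props (key offset : Int) (hk : 2 ≤ key) (m : Nat) :
    ((List.range m).foldl (fun rl i => pvIncr rl (pvRowOf key offset i))
        (List.replicate key.toNat 0)).length = key.toNat ∧
    (∀ x ∈ (List.range m).foldl (fun rl i => pvIncr rl (pvRowOf key offset i))
        (List.replicate key.toNat 0), 0 ≤ x) ∧
    ((List.range m).foldl (fun rl i => pvIncr rl (pvRowOf key offset i))
        (List.replicate key.toNat 0)).sum = m := by
  induction m with
  | zero =>
    refine ⟨by simp, ?_, by simp⟩
    intro x hx
    simp [List.eq_of_mem_replicate hx]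
  | succ m ih =>
    obtain ⟨hlen, hnn, hsum⟩ := ih
    have hrb := pv_rowOf_bounds key offset hk m
    have hlt : (pvRowOf key offset m).toNat < key.toNat := by omega
    rw [List.range_succ, List.foldl_append, List.foldl_cons, List.foldl_nil]
    simp only [pvIncr] at hlen hnn hsum ⊢
    set L := List.foldl
        (fun rl i => rl.set (pvRowOf key offset i).toNat (rl.getD (pvRowOf key offset i).toNat 0 + 1))
        (List.replicate key.toNat (0 : Int)) (List.range m) with hL
    have hj : (pvRowOf key offset m).toNat < L.length := by omega
    refine ⟨?_, ?_, ?_⟩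
    · rw [List.length_set]; exact hlen
    · intro x hx
      rcases List.mem_or_eq_of_mem_set hx with h | h
      · exact hnn x h
      · rw [List.getD_eq_getElem _ _ hj] at h
        have := hnn _ (List.getElem_mem hj)
        omega
    · rw [pv_sum_incr L _ hj, hsum]
      push_cast; ring

theorem pv_head_eq (cs : List Char) (pos : Nat) (n : Int) (hn : 0 ≤ n)
    (hle : (pos : Int) + n ≤ cs.length) :
    (PySem.List.pyRange 0 n 1).map
        (fun c => String.ofList [(PySem.List.pyGet? cs (c + (pos : Int))).getD ' ']) =
      (PySem.List.slice cs (some (pos : Int)) (some ((pos : Int) + n))).map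
        (fun ch => String.ofList [ch]) := by
  obtain ⟨m, rfl⟩ : ∃ m : Nat, n = (m : Int) := ⟨n.toNat, (Int.toNat_of_nonneg hn).symm⟩
  have hml : pos + m ≤ cs.length := by omega
  rw [PySem.List.slice_natCast_add cs pos m, PySem.List.pyRange_one]
  simp only [sub_zero, Int.toNat_natCast, List.map_map]
  apply List.ext_getElem
  · simp only [List.length_map, List.length_range, List.length_take, List.length_drop]
    omega
  · intro i h1 h2
    simp only [List.length_map, List.length_range] at h1
    have hlt : pos + i < cs.length := by omega
    simp only [List.getElem_map, List.getElem_range, Function.comp_apply,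
      List.getElem_take, List.getElem_drop]
    rw [show (0 : Int) + (i : Int) + (pos : Int) = ((pos + i : Nat) : Int) by push_cast; ring]
    rw [PySem.List.pyGet?_natCast, List.getElem?_eq_getElem hlt]
    rfl

theorem pv_chunks_eq (cs : List Char) :
    ∀ (rls : List Int) (pos : Nat),
      (∀ x ∈ rls, 0 ≤ x) →
      (pos : Int) + rls.sum ≤ cs.length →
      pvALoop2 cs rls (pos : Int) = pvBChunks cs rls (pos : Int) := by
  intro rls
  induction rls with
  | nil => intro pos _ _; simp [pvALoop2, pvBChunks]
  | cons n rest ih =>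
    intro pos hnn hle
    have hn : 0 ≤ n := hnn n (by simp)
    have hrest : 0 ≤ rest.sum := List.sum_nonneg (fun x hx => hnn x (by simp [hx]))
    have hle' : (pos : Int) + n ≤ cs.length := by
      simp only [List.sum_cons] at hle; omega
    have hcast : (pos : Int) + n = ((pos + n.toNat : Nat) : Int) := by
      push_cast [Int.toNat_of_nonneg hn]; ring
    simp only [pvALoop2, pvBChunks]
    rw [pv_head_eq cs pos n hn hle', hcast,
        ih (pos + n.toNat) (fun x hx => hnn x (by simp [hx]))
          (by push_cast [Int.toNat_of_nonneg hn]
              simp only [List.sum_cons] at hle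
              omega)]

-- ===== VERDICT (by name: the statement is the Claim_ definition above) =====
theorem build_ciphertext_chunks_spec : Claim_equal_build_ciphertext_chunks := by
  intro key message offset hdom hpre
  unfold Spec_build_ciphertext_chunks
  rcases hpre with hk | ⟨hk, hm⟩
  · unfold build_ciphertext_chunks build_ciphertext_chunks_alt
    simp only [pv_det_eq key offset hk]
    rw [pv_loop1_eq key offset hk message.toList message.toList.length 0 _ (by simp),
        ← List.range_eq_range']
    show pvALoop2 message.toList
        ((List.range message.toList.length).foldl
          (fun rl i => pvIncr rl (pvRowOf key offset i)) (List.replicate key.toNat 0)) ((0 : Nat) : Int) =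
      pvBChunks message.toList
        ((List.range message.toList.length).foldl
          (fun rl i => pvIncr rl (pvRowOf key offset i)) (List.replicate key.toNat 0)) ((0 : Nat) : Int)
    obtain ⟨hlen, hnn, hsum⟩ := pv_fold_props key offset hk message.toList.length
    exact pv_chunks_eq message.toList _ 0 hnn (by rw [hsum]; simp)
  · subst hm
    simp [build_ciphertext_chunks, build_ciphertext_chunks_alt, pvALoop1, pvALoop2, pvBChunks,
      Int.toNat_of_nonpos hk]
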